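-- pv_equiv track=rewrite | github.com/CAREamics/careamics | src/careamics/config/validators/axes_validators.py | check_czi_axes_validity
-- ===== SOURCE A (Python) =====
-- def check_czi_axes_validity(axes: str) -> bool:
--     """
--     Check if the provided axes string is valid for CZI files.
--
--     CZI axes is always in the "SC(Z/T)YX" format, where Z or T are optional, and S and C
--     can be singleton dimensions, but must be provided.
--
--     Parameters
--     ----------
--     axes : str
--         The axes string to validate.
--
--     Returns
--     -------
--     bool
--         True if the axes string is valid, False otherwise.
--     """
--     valid_axes = {"S", "C", "Z", "T", "Y", "X"}
--     axes_set = set(axes)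
--
--     # check for invalid characters
--     if not axes_set.issubset(valid_axes):
--         return False
--
--     # check for mandatory axes
--     if not ({"S", "C", "Y", "X"}.issubset(axes_set)):
--         return False
--
--     # check for mutually exclusive axes
--     if "Z" in axes_set and "T" in axes_set:
--         return False
--
--     # check for correct order
--     order = "SCZYX" if "Z" in axes else "SCTYX"
--     last_index = -1
--     for axis in axes:
--         current_index = order.find(axis)
--         if current_index < last_index:
--             return False
--         last_index = current_index
--
--     return True
-- ===== SOURCE B (Python) =====
-- def check_czi_axes_validity(axes: str) -> bool:
--     # Compress runs of equal adjacent axes, then compare with the three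
--     # admissible shapes directly.
--     runs = []
--     for ch in axes:
--         if not runs or runs[-1] != ch:
--             runs.append(ch)
--     return "".join(runs) in ("SCYX", "SCZYX", "SCTYX")
-- ===== Notes on version B (the rewrite author's own statement) =====
-- stated objective: simpler
-- what changed: Replaces A's three set guards plus running last_index order scan by compressing runs of equal adjacent characters and comparing the compressed string with the three admissible shapes SCYX, SCZYX, SCTYX.
import Mathlib
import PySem

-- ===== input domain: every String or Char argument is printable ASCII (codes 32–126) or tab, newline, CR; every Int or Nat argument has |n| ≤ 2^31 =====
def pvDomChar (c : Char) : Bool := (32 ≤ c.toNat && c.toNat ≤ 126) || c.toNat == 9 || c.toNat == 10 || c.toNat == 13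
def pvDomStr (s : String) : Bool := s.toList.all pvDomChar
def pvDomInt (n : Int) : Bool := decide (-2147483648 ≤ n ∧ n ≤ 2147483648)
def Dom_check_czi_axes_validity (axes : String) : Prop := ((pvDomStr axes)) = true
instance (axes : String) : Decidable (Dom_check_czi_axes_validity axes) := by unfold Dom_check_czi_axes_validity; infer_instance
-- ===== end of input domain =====

-- B replaces A's running last-index order scan by compressing runs of equal
-- adjacent axes and comparing with the three admissible shapes (objective: simpler).

-- ===== PORT A =====
-- the 'for axis in axes' loop with running last_index and early 'return False'
def cziLoopA (order : List Char) : List Char → Int → Bool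
  | [], _ => true
  | a :: rest, last_index =>
      let current_index := PySem.Chars.find order [a]
      if current_index < last_index then false
      else cziLoopA order rest current_index

def check_czi_axes_validity (axes : String) : Bool :=
  let valid_axes : PySem.Set Char := PySem.Set.ofList ['S', 'C', 'Z', 'T', 'Y', 'X']
  let axes_set : PySem.Set Char := PySem.Set.ofList axes.toList
  if !(PySem.Set.issubset axes_set valid_axes) then false
  else if !(PySem.Set.issubset (PySem.Set.ofList ['S', 'C', 'Y', 'X']) axes_set) then false
  else if PySem.Set.contains axes_set 'Z' && PySem.Set.contains axes_set 'T' then false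
  else
    let order : String := if PySem.Str.isIn "Z" axes then "SCZYX" else "SCTYX"
    cziLoopA order.toList axes.toList (-1)

-- ===== PORT B =====
def check_czi_axes_validity_alt (axes : String) : Bool :=
  let runs : List Char :=
    axes.toList.foldl
      (fun runs ch => if runs.isEmpty || runs.getLast? != some ch then runs ++ [ch] else runs) []
  runs == "SCYX".toList || runs == "SCZYX".toList || runs == "SCTYX".toList

-- ===== PRECONDITION & SPEC =====
def Spec_check_czi_axes_validity (axes : String) (out : Bool) : Prop := out = check_czi_axes_validity_alt axes
instance (axes : String) (out : Bool) : Decidable (Spec_check_czi_axes_validity axes out) := by unfold Spec_check_czi_axes_validity; infer_instance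

-- ===== CLAIM (what is proved, stated in full; the proofs are below) =====
def Claim_equal_check_czi_axes_validity : Prop := ∀ (axes : String), Dom_check_czi_axes_validity axes → Spec_check_czi_axes_validity axes (check_czi_axes_validity axes)

-- ===== LEMMAS AND PROOFS =====

-- run-compression as plain structural recursion (proof-side mirror of B's foldl)
def dd (prev : Char) : List Char → List Char
  | [] => []
  | a :: rest => if a = prev then dd prev rest else a :: dd a rest
def dedup : List Char → List Char
  | [] => []
  | a :: rest => a :: dd a rest

theorem foldl_dd (l : List Char) : ∀ (acc : List Char) (prev : Char),
    acc.getLast? = some prev →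
    l.foldl (fun runs ch => if runs.isEmpty || runs.getLast? != some ch then runs ++ [ch] else runs) acc
      = acc ++ dd prev l := by
  induction l with
  | nil => intro acc prev h; simp [dd]
  | cons a rest ih =>
    intro acc prev h
    have hne : acc ≠ [] := by intro hc; simp [hc] at h
    by_cases hap : a = prev
    · subst hap
      simp only [List.foldl_cons, dd, if_pos rfl]
      have : (if acc.isEmpty || acc.getLast? != some a then acc ++ [a] else acc) = acc := by
        simp [List.isEmpty_iff, hne, h]
      rw [this]; exact ih acc a h
    · simp only [List.foldl_cons, dd, if_neg hap]
      have : (if acc.isEmpty || acc.getLast? != some a then acc ++ [a] else acc) = acc ++ [a] := by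
        have : prev ≠ a := fun hc => hap hc.symm
        simp [List.isEmpty_iff, hne, h, this]
      rw [this, ih (acc ++ [a]) a (by simp)]
      simp

theorem foldl_dedup (l : List Char) :
    l.foldl (fun runs ch => if runs.isEmpty || runs.getLast? != some ch then runs ++ [ch] else runs) []
      = dedup l := by
  cases l with
  | nil => simp [dedup]
  | cons a rest => simp only [List.foldl_cons]; simpa [dedup] using foldl_dd rest [a] a (by simp)

theorem mem_cons_dd (l : List Char) : ∀ (prev x : Char), x ∈ prev :: dd prev l ↔ x ∈ prev :: l := by
  induction l with
  | nil => intro prev x; simp [dd]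
  | cons a rest ih =>
    intro prev x
    by_cases hap : a = prev
    · subst hap
      have hd : dd a (a::rest) = dd a rest := by simp [dd]
      rw [hd, ih]; simp
    · have hd : dd prev (a::rest) = a :: dd a rest := by simp [dd, hap]
      rw [hd]
      have h2 := ih a x
      simp only [List.mem_cons] at h2 ⊢
      tauto

theorem mem_dedup (l : List Char) (x : Char) : x ∈ dedup l ↔ x ∈ l := by
  cases l with
  | nil => simp [dedup]
  | cons a rest => simpa [dedup] using mem_cons_dd rest a x

theorem chain_dd (l : List Char) : ∀ prev : Char, (prev :: dd prev l).IsChain (· ≠ ·) := by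
  induction l with
  | nil => intro prev; simp [dd]
  | cons a rest ih =>
    intro prev
    by_cases hap : a = prev
    · subst hap; simp only [dd, if_pos rfl]; exact ih a
    · have hd : dd prev (a::rest) = a :: dd a rest := by simp [dd, hap]
      rw [hd]
      exact List.isChain_cons_cons.2 ⟨fun hc => hap hc.symm, ih a⟩

theorem go_shift (sub : List Char) (l : List Char) : ∀ k : Nat,
    PySem.Chars.find.go sub l (k+1)
      = if PySem.Chars.find.go sub l k = -1 then -1 else PySem.Chars.find.go sub l k + 1 := by
  induction l with
  | nil =>
    intro k
    by_cases h : sub.isEmpty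
    · simp [PySem.Chars.find.go, h]
    · simp [PySem.Chars.find.go, h]
  | cons a t ih =>
    intro k
    by_cases h : sub.isPrefixOf (a :: t)
    · simp [PySem.Chars.find.go, h]
    · simp only [PySem.Chars.find.go, h, if_false, Bool.false_eq_true]
      exact ih (k+1)

theorem find_singleton (o : List Char) (a : Char) :
    PySem.Chars.find o [a] = if a ∈ o then ((List.idxOf a o : Nat) : Int) else -1 := by
  induction o with
  | nil => simp [PySem.Chars.find, PySem.Chars.find.go]
  | cons c t ih =>
    by_cases hac : a = c
    · subst hac
      simp [PySem.Chars.find, PySem.Chars.find.go, List.isPrefixOf, List.idxOf_cons]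
    · have h1 : PySem.Chars.find (c :: t) [a] = PySem.Chars.find.go [a] t 1 := by
        simp [PySem.Chars.find, PySem.Chars.find.go, List.isPrefixOf, hac]
      have h2 := go_shift [a] t 0
      have h3 : PySem.Chars.find t [a] = PySem.Chars.find.go [a] t 0 := rfl
      rw [h1, h2, ← h3, ih]
      by_cases hm : a ∈ t
      · have hne : ((List.idxOf a t : Nat) : Int) ≠ -1 := by omega
        have hbif : (c == a) = false := by simp [Ne.symm hac]
        simp [hm, hac, List.idxOf_cons, hne, hbif]
      · simp [hm, hac]

theorem loopA_dd (o : List Char) (l : List Char) : ∀ prev : Char,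
    cziLoopA o l (PySem.Chars.find o [prev]) = cziLoopA o (dd prev l) (PySem.Chars.find o [prev]) := by
  induction l with
  | nil => intro prev; simp [dd]
  | cons a rest ih =>
    intro prev
    by_cases hap : a = prev
    · subst hap
      have hd : dd a (a::rest) = dd a rest := by simp [dd]
      rw [hd, ← ih a]
      simp [cziLoopA]
    · have hd : dd prev (a::rest) = a :: dd a rest := by simp [dd, hap]
      rw [hd]
      simp only [cziLoopA]
      split_ifs with h
      · rfl
      · exact ih a

theorem loopA_dedup (o : List Char) (l : List Char) :
    cziLoopA o l (-1) = cziLoopA o (dedup l) (-1) := by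
  cases l with
  | nil => rfl
  | cons a rest =>
    simp only [dedup, cziLoopA]
    split_ifs with h
    · rfl
    · exact loopA_dd o rest a

theorem loopA_iff (o : List Char) (d : List Char) : ∀ last : Int,
    cziLoopA o d last = true ↔
      ((∀ h ∈ d.head?, last ≤ PySem.Chars.find o [h]) ∧
        d.IsChain (fun x y => PySem.Chars.find o [x] ≤ PySem.Chars.find o [y])) := by
  induction d with
  | nil => intro last; simp [cziLoopA]
  | cons a rest ih =>
    intro last
    simp only [cziLoopA]
    split_ifs with h
    · simp; intro h'; omega
    · rw [ih]
      cases rest with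
      | nil => simp; omega
      | cons b t =>
        simp only [List.head?, Option.mem_some_iff, List.isChain_cons_cons]
        constructor
        · rintro ⟨h1, h2⟩
          exact ⟨by rintro x rfl; omega, h1 b rfl, h2⟩
        · rintro ⟨_, h1, h2⟩
          exact ⟨by rintro x rfl; exact h1, h2⟩

theorem chain_strict (o : List Char) (d : List Char)
    (hmem : ∀ a ∈ d, a ∈ o)
    (hne : d.IsChain (· ≠ ·))
    (hle : d.IsChain (fun x y => PySem.Chars.find o [x] ≤ PySem.Chars.find o [y])) :
    d.IsChain (fun x y => PySem.Chars.find o [x] < PySem.Chars.find o [y]) := by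
  induction d with
  | nil => simp
  | cons a rest ih =>
    cases rest with
    | nil => simp
    | cons b t =>
      rw [List.isChain_cons_cons] at hne hle ⊢
      refine ⟨?_, ih (fun x hx => hmem x (List.mem_cons_of_mem a hx)) hne.2 hle.2⟩
      have ha := hmem a (by simp)
      have hb := hmem b (by simp)
      have h1 := hle.1
      rw [find_singleton, find_singleton, if_pos ha, if_pos hb] at h1 ⊢
      rcases lt_or_eq_of_le h1 with h | h
      · exact h
      · exfalso
        have : List.idxOf a o = List.idxOf b o := by omega
        have hga : o[List.idxOf a o]? = some a := List.getElem?_idxOf ha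
        have hgb : o[List.idxOf b o]? = some b := List.getElem?_idxOf hb
        rw [this, hgb] at hga
        exact hne.1 (by injection hga with hv; exact hv.symm)

theorem pairwise_of_chain_lt (o : List Char) (d : List Char)
    (h : d.IsChain (fun x y => PySem.Chars.find o [x] < PySem.Chars.find o [y])) :
    d.Pairwise (fun x y => PySem.Chars.find o [x] < PySem.Chars.find o [y]) := by
  haveI : IsTrans Char (fun x y => PySem.Chars.find o [x] < PySem.Chars.find o [y]) :=
    ⟨fun _ _ _ h1 h2 => lt_trans h1 h2⟩
  exact List.isChain_iff_pairwise.1 h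
theorem chain_pos_sublist (o : List Char) : ∀ d : List Char,
    (∀ a ∈ d, a ∈ o) →
    d.Pairwise (fun x y => PySem.Chars.find o [x] < PySem.Chars.find o [y]) →
    d.Sublist o := by
  induction o with
  | nil =>
    intro d hmem _
    have : d = [] := by
      cases d with
      | nil => rfl
      | cons a t => exact absurd (hmem a (by simp)) (by simp)
    simp [this]
  | cons c o' ih =>
    intro d hmem hpw
    have hposc : PySem.Chars.find (c :: o') [c] = 0 := by
      rw [find_singleton]; simp [List.idxOf_cons]
    have hpos : ∀ x ∈ o', x ≠ c → PySem.Chars.find (c :: o') [x] = 1 + PySem.Chars.find o' [x] := by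
      intro x hx hxc
      rw [find_singleton, find_singleton]
      have hbif : (c == x) = false := by simp [Ne.symm hxc]
      simp [hx, hxc, List.idxOf_cons, hbif]; omega
    cases d with
    | nil => exact List.nil_sublist _
    | cons a rest =>
      rw [List.pairwise_cons] at hpw
      obtain ⟨hra, hpw'⟩ := hpw
      by_cases hac : a = c
      · subst hac
        have hrest : ∀ b ∈ rest, b ∈ o' ∧ b ≠ a := by
          intro b hb
          have hbo := hmem b (List.mem_cons_of_mem _ hb)
          have hlt := hra b hb
          rw [hposc] at hlt
          have hbne : b ≠ a := by
            intro hba; subst hba; rw [hposc] at hlt; exact lt_irrefl _ hlt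
          have hbo' : b ∈ o' := by
            rcases List.mem_cons.1 hbo with h | h
            · exact absurd h hbne
            · exact h
          exact ⟨hbo', hbne⟩
        refine List.Sublist.cons₂ _ (ih rest (fun b hb => (hrest b hb).1) ?_)
        refine hpw'.imp_of_mem ?_
        intro x y hx hy hxy
        rw [hpos x (hrest x hx).1 (hrest x hx).2, hpos y (hrest y hy).1 (hrest y hy).2] at hxy
        omega
      · have hao' : a ∈ o' := by
          rcases List.mem_cons.1 (hmem a (by simp)) with h | h
          · exact absurd h hac
          · exact h
        have hall : ∀ b ∈ a :: rest, b ∈ o' ∧ b ≠ c := by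
          intro b hb
          rcases List.mem_cons.1 hb with rfl | hb'
          · exact ⟨hao', hac⟩
          · have hlt := hra b hb'
            have hposa : PySem.Chars.find (c :: o') [a] = 1 + PySem.Chars.find o' [a] :=
              hpos a hao' hac
            have hge : (0:Int) ≤ PySem.Chars.find o' [a] := by
              rw [find_singleton, if_pos hao']; positivity
            have hbne : b ≠ c := by
              intro hbc; subst hbc; rw [hposc] at hlt; omega
            have hbo' : b ∈ o' := by
              rcases List.mem_cons.1 (hmem b (List.mem_cons_of_mem _ hb')) with h | h
              · exact absurd h hbne
              · exact h
            exact ⟨hbo', hbne⟩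
        have hpw0 : (a :: rest).Pairwise
            (fun x y => PySem.Chars.find (c :: o') [x] < PySem.Chars.find (c :: o') [y]) :=
          List.pairwise_cons.2 ⟨hra, hpw'⟩
        refine List.Sublist.cons _ (ih (a :: rest) (fun b hb => (hall b hb).1) ?_)
        refine hpw0.imp_of_mem ?_
        intro x y hx hy hxy
        rw [hpos x (hall x hx).1 (hall x hx).2, hpos y (hall y hy).1 (hall y hy).2] at hxy
        omega

theorem chain_dedup (l : List Char) : (dedup l).IsChain (· ≠ ·) := by
  cases l with
  | nil => simp [dedup]
  | cons a rest => simpa [dedup] using chain_dd rest a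

theorem isIn_Z_iff (axes : String) : PySem.Str.isIn "Z" axes = true ↔ 'Z' ∈ axes.toList := by
  rw [PySem.Str.isIn_iff_infix]
  constructor
  · intro h; exact h.subset (by simp)
  · intro h
    rcases List.append_of_mem h with ⟨s, t, heq⟩
    exact ⟨s, t, by rw [heq]; simp⟩

theorem alt_iff (axes : String) : check_czi_axes_validity_alt axes = true ↔
    (dedup axes.toList = "SCYX".toList ∨ dedup axes.toList = "SCZYX".toList ∨
      dedup axes.toList = "SCTYX".toList) := by
  unfold check_czi_axes_validity_alt
  rw [foldl_dedup]
  simp only [Bool.or_eq_true, beq_iff_eq]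
  tauto

theorem A_iff (axes : String) : check_czi_axes_validity axes = true ↔
    ((∀ x ∈ axes.toList, x ∈ (['S', 'C', 'Z', 'T', 'Y', 'X'] : List Char)) ∧
     ('S' ∈ axes.toList ∧ 'C' ∈ axes.toList ∧ 'Y' ∈ axes.toList ∧ 'X' ∈ axes.toList) ∧
     ¬('Z' ∈ axes.toList ∧ 'T' ∈ axes.toList) ∧
     cziLoopA (if 'Z' ∈ axes.toList then "SCZYX".toList else "SCTYX".toList)
       axes.toList (-1) = true) := by
  unfold check_czi_axes_validity
  have h1 : (PySem.Set.issubset (PySem.Set.ofList axes.toList)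
      (PySem.Set.ofList ['S', 'C', 'Z', 'T', 'Y', 'X']) = true) ↔
      (∀ x ∈ axes.toList, x ∈ (['S', 'C', 'Z', 'T', 'Y', 'X'] : List Char)) := by
    simp [PySem.Set.issubset_iff]
  have h2 : (PySem.Set.issubset (PySem.Set.ofList ['S', 'C', 'Y', 'X'])
      (PySem.Set.ofList axes.toList) = true) ↔
      ('S' ∈ axes.toList ∧ 'C' ∈ axes.toList ∧ 'Y' ∈ axes.toList ∧ 'X' ∈ axes.toList) := by
    simp [PySem.Set.issubset_iff]
  have h3 : ((PySem.Set.contains (PySem.Set.ofList axes.toList) 'Z' &&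
      PySem.Set.contains (PySem.Set.ofList axes.toList) 'T') = true) ↔
      ('Z' ∈ axes.toList ∧ 'T' ∈ axes.toList) := by
    simp [pysem]
  have hz := isIn_Z_iff axes
  cases hc1 : PySem.Set.issubset (PySem.Set.ofList axes.toList)
      (PySem.Set.ofList ['S', 'C', 'Z', 'T', 'Y', 'X']) with
  | false =>
    simp only [hc1, Bool.not_false, if_true, Bool.false_eq_true, false_iff]
    rintro ⟨hval, -, -, -⟩
    have hx := h1.2 hval
    rw [hc1] at hx
    exact Bool.false_ne_true hx
  | true =>
    simp only [hc1, Bool.not_true, Bool.false_eq_true, if_false]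
    cases hc2 : PySem.Set.issubset (PySem.Set.ofList ['S', 'C', 'Y', 'X'])
        (PySem.Set.ofList axes.toList) with
    | false =>
      simp only [hc2, Bool.not_false, if_true, Bool.false_eq_true, false_iff]
      rintro ⟨-, hman, -, -⟩
      have hx := h2.2 hman
      rw [hc2] at hx
      exact Bool.false_ne_true hx
    | true =>
      simp only [hc2, Bool.not_true, Bool.false_eq_true, if_false]
      cases hc3 : (PySem.Set.contains (PySem.Set.ofList axes.toList) 'Z' &&
          PySem.Set.contains (PySem.Set.ofList axes.toList) 'T') with
      | true =>
        simp only [hc3, if_true, Bool.false_eq_true, false_iff]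
        rintro ⟨-, -, hzt, -⟩
        exact hzt (h3.1 hc3)
      | false =>
        simp only [hc3, Bool.false_eq_true, if_false]
        have hp1 := h1.1 hc1
        have hp2 := h2.1 hc2
        have hp3 : ¬('Z' ∈ axes.toList ∧ 'T' ∈ axes.toList) := by
          intro hc
          have hx := h3.2 hc
          rw [hc3] at hx
          exact Bool.false_ne_true hx
        by_cases hzl : 'Z' ∈ axes.toList
        · rw [if_pos (hz.2 hzl), if_pos hzl]
          exact ⟨fun h => ⟨hp1, hp2, hp3, h⟩, fun h => h.2.2.2⟩
        · rw [if_neg (fun h => hzl (hz.1 h)), if_neg hzl]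
          exact ⟨fun h => ⟨hp1, hp2, hp3, h⟩, fun h => h.2.2.2⟩

theorem main_equiv (axes : String) :
    check_czi_axes_validity axes = check_czi_axes_validity_alt axes := by
  rw [Bool.eq_iff_iff, A_iff, alt_iff]
  constructor
  · rintro ⟨hval, ⟨hS, hC, hY, hX⟩, hZT, hloop⟩
    have hSd := (mem_dedup axes.toList 'S').2 hS
    have hCd := (mem_dedup axes.toList 'C').2 hC
    have hYd := (mem_dedup axes.toList 'Y').2 hY
    have hXd := (mem_dedup axes.toList 'X').2 hX
    by_cases hzin : 'Z' ∈ axes.toList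
    · rw [if_pos hzin] at hloop
      have hT : 'T' ∉ axes.toList := fun hT => hZT ⟨hzin, hT⟩
      have hmem : ∀ a ∈ axes.toList, a ∈ "SCZYX".toList := by
        intro a ha
        have h6 := hval a ha
        simp only [List.mem_cons, List.not_mem_nil, or_false] at h6
        rcases h6 with rfl | rfl | rfl | rfl | rfl | rfl
        · decide
        · decide
        · decide
        · exact absurd ha hT
        · decide
        · decide
      have hdmem : ∀ a ∈ dedup axes.toList, a ∈ "SCZYX".toList :=
        fun a ha => hmem a ((mem_dedup axes.toList a).1 ha)
      have hloopd : cziLoopA "SCZYX".toList (dedup axes.toList) (-1) = true := by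
        rw [← loopA_dedup]; exact hloop
      obtain ⟨-, hchainle⟩ := (loopA_iff "SCZYX".toList (dedup axes.toList) (-1)).1 hloopd
      have hlt := chain_strict "SCZYX".toList _ hdmem (chain_dedup axes.toList) hchainle
      have hsub := chain_pos_sublist "SCZYX".toList _ hdmem
        (pairwise_of_chain_lt "SCZYX".toList _ hlt)
      have hZd := (mem_dedup axes.toList 'Z').2 hzin
      have key : ∀ d ∈ ("SCZYX".toList).sublists,
          'S' ∈ d → 'C' ∈ d → 'Y' ∈ d → 'X' ∈ d → 'Z' ∈ d → d = "SCZYX".toList := by decide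
      exact Or.inr (Or.inl
        (key _ (List.mem_sublists.2 hsub) hSd hCd hYd hXd hZd))
    · rw [if_neg hzin] at hloop
      have hmem : ∀ a ∈ axes.toList, a ∈ "SCTYX".toList := by
        intro a ha
        have h6 := hval a ha
        simp only [List.mem_cons, List.not_mem_nil, or_false] at h6
        rcases h6 with rfl | rfl | rfl | rfl | rfl | rfl
        · decide
        · decide
        · exact absurd ha hzin
        · decide
        · decide
        · decide
      have hdmem : ∀ a ∈ dedup axes.toList, a ∈ "SCTYX".toList :=
        fun a ha => hmem a ((mem_dedup axes.toList a).1 ha)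
      have hloopd : cziLoopA "SCTYX".toList (dedup axes.toList) (-1) = true := by
        rw [← loopA_dedup]; exact hloop
      obtain ⟨-, hchainle⟩ := (loopA_iff "SCTYX".toList (dedup axes.toList) (-1)).1 hloopd
      have hlt := chain_strict "SCTYX".toList _ hdmem (chain_dedup axes.toList) hchainle
      have hsub := chain_pos_sublist "SCTYX".toList _ hdmem
        (pairwise_of_chain_lt "SCTYX".toList _ hlt)
      have key : ∀ d ∈ ("SCTYX".toList).sublists,
          'S' ∈ d → 'C' ∈ d → 'Y' ∈ d → 'X' ∈ d →
            (d = "SCYX".toList ∨ d = "SCTYX".toList) := by decide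
      rcases key _ (List.mem_sublists.2 hsub) hSd hCd hYd hXd with h | h
      · exact Or.inl h
      · exact Or.inr (Or.inr h)
  · intro hd
    have hmem : ∀ x : Char, x ∈ axes.toList ↔ x ∈ dedup axes.toList :=
      fun x => (mem_dedup axes.toList x).symm
    rcases hd with hd | hd | hd
    all_goals rw [hd] at hmem
    · have hzn : 'Z' ∉ axes.toList := fun h => by
        have := (hmem 'Z').1 h; revert this; decide
      refine ⟨?_, ⟨?_, ?_, ?_, ?_⟩, ?_, ?_⟩
      · intro x hx
        have hxd := (hmem x).1 hx
        have hrw : "SCYX".toList = (['S', 'C', 'Y', 'X'] : List Char) := rfl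
        rw [hrw] at hxd
        simp only [List.mem_cons, List.not_mem_nil, or_false] at hxd
        rcases hxd with rfl | rfl | rfl | rfl 
        all_goals decide
      · exact (hmem 'S').2 (by decide)
      · exact (hmem 'C').2 (by decide)
      · exact (hmem 'Y').2 (by decide)
      · exact (hmem 'X').2 (by decide)
      · rintro ⟨hz, -⟩; exact hzn hz
      · rw [if_neg hzn, loopA_dedup, hd]; decide
    · have hzin : 'Z' ∈ axes.toList := (hmem 'Z').2 (by decide)
      refine ⟨?_, ⟨?_, ?_, ?_, ?_⟩, ?_, ?_⟩
      · intro x hx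
        have hxd := (hmem x).1 hx
        have hrw : "SCZYX".toList = (['S', 'C', 'Z', 'Y', 'X'] : List Char) := rfl
        rw [hrw] at hxd
        simp only [List.mem_cons, List.not_mem_nil, or_false] at hxd
        rcases hxd with rfl | rfl | rfl | rfl | rfl
        all_goals decide
      · exact (hmem 'S').2 (by decide)
      · exact (hmem 'C').2 (by decide)
      · exact (hmem 'Y').2 (by decide)
      · exact (hmem 'X').2 (by decide)
      · rintro ⟨-, ht⟩; have := (hmem 'T').1 ht; revert this; decide
      · rw [if_pos hzin, loopA_dedup, hd]; decide
    · have hzn : 'Z' ∉ axes.toList := fun h => by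
        have := (hmem 'Z').1 h; revert this; decide
      refine ⟨?_, ⟨?_, ?_, ?_, ?_⟩, ?_, ?_⟩
      · intro x hx
        have hxd := (hmem x).1 hx
        have hrw : "SCTYX".toList = (['S', 'C', 'T', 'Y', 'X'] : List Char) := rfl
        rw [hrw] at hxd
        simp only [List.mem_cons, List.not_mem_nil, or_false] at hxd
        rcases hxd with rfl | rfl | rfl | rfl | rfl
        all_goals decide
      · exact (hmem 'S').2 (by decide)
      · exact (hmem 'C').2 (by decide)
      · exact (hmem 'Y').2 (by decide)
      · exact (hmem 'X').2 (by decide)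
      · rintro ⟨hz, -⟩; exact hzn hz
      · rw [if_neg hzn, loopA_dedup, hd]; decide

-- ===== VERDICT (by name: the statement is the Claim_ definition above) =====
theorem check_czi_axes_validity_spec : Claim_equal_check_czi_axes_validity := by
  intro axes _
  unfold Spec_check_czi_axes_validity
  exact main_equiv axes
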